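-- pv_equiv track=rewrite | github.com/ravin-d-27/Litcoder_Python | Lab/Maximize_Number_of_Subsequences.py | maximize_Number_Of_Subsequences
-- ===== SOURCE A (Python) =====
-- def maximize_Number_Of_Subsequences(text, pattern):
--     ans = 0;
--     x = 0;
--     y = 0;
--     for i in text:
--         if i==pattern[1]:
--             ans+=x
--             y+=1
--
--         if i==pattern[0]:
--             x+=1
--     final = max(x,y)
--     return ans+final
-- ===== SOURCE B (Python) =====
-- def maximize_Number_Of_Subsequences(text, pattern):
--     p0, p1 = pattern[0], pattern[1]
--
--     def solve(s):
--         # returns (pairs, c0, c1) for the segment s: pairs = # of (i<j) with s[i]==p0, s[j]==p1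
--         if len(s) <= 1:
--             return (0, 1 if s == p0 else 0, 1 if s == p1 else 0)
--         mid = len(s) // 2
--         lp, lc0, lc1 = solve(s[:mid])
--         rp, rc0, rc1 = solve(s[mid:])
--         return (lp + rp + lc0 * rc1, lc0 + rc0, lc1 + rc1)
--
--     pairs, c0, c1 = solve(text)
--     return pairs + max(c0, c1)
-- ===== Notes on version B (the rewrite author's own statement) =====
-- stated objective: alternative
-- what changed: B replaces A's single accumulator pass with a divide-and-conquer recursion: each half returns (pairs, count of pattern[0], count of pattern[1]) and the merge adds left-count0 * right-count1 cross pairs.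
-- outside the precondition, e.g. on maximize_Number_Of_Subsequences('', 'a'): A returns 0, B raises IndexError
import Mathlib
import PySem

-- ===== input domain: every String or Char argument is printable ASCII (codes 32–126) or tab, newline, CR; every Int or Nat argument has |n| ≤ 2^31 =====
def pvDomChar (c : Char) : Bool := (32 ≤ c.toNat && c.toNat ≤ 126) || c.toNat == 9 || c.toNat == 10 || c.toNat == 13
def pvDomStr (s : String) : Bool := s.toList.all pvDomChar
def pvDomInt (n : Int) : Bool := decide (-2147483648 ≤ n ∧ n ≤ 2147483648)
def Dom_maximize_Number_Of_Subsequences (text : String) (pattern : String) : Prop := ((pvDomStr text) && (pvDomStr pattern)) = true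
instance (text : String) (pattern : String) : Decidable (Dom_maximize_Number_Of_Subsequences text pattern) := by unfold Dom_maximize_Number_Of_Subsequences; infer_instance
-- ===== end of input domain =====

-- B counts pattern[0]..pattern[1] pairs by divide-and-conquer (halve the text, merge with left-c0 * right-c1) instead of A's single accumulator pass (alternative decomposition).


-- ===== PORT A =====
-- the loop body: 'if i==pattern[1]: ans+=x; y+=1' then 'if i==pattern[0]: x+=1'; state (ans, x, y)
def pvStepA (pattern : String) (st : Int × Int × Int) (i : Char) : Int × Int × Int :=
  let st := if PySem.Str.pyGet? pattern 1 = some i then (st.1 + st.2.1, st.2.1, st.2.2 + 1) else st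
  if PySem.Str.pyGet? pattern 0 = some i then (st.1, st.2.1 + 1, st.2.2) else st

def maximize_Number_Of_Subsequences (text : String) (pattern : String) : Int :=
  let s := text.toList.foldl (pvStepA pattern) (0, 0, 0)
  let final := max s.2.1 s.2.2
  s.1 + final

-- ===== PORT B =====
-- solve(s): returns (pairs, c0, c1) for the segment; base case len ≤ 1 compares the
-- one-character string with p0/p1 ('s == p0' is false for the empty string);
-- s[:mid] / s[mid:] with 0 ≤ mid ≤ len are exactly take/drop.
def pvSolve (p0 p1 : Char) (s : List Char) : Int × Int × Int :=
  if s.length ≤ 1 then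
    (0, if s = [p0] then 1 else 0, if s = [p1] then 1 else 0)
  else
    let mid := s.length / 2
    let l := pvSolve p0 p1 (s.take mid)
    let r := pvSolve p0 p1 (s.drop mid)
    (l.1 + r.1 + l.2.1 * r.2.2, l.2.1 + r.2.1, l.2.2 + r.2.2)
  termination_by s.length
  decreasing_by
    · simp only [List.length_take]; omega
    · simp only [List.length_drop]; omega

def maximize_Number_Of_Subsequences_alt (text : String) (pattern : String) : Int :=
  match PySem.Str.pyGet? pattern 0, PySem.Str.pyGet? pattern 1 with
  | some p0, some p1 =>
    let s := pvSolve p0 p1 text.toList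
    s.1 + max s.2.1 s.2.2
  | _, _ => 0  -- IndexError in Python: excluded by Pre_

-- ===== PRECONDITION & SPEC =====
-- Pre_ excludes patterns of length < 2: there A raises IndexError whenever text is nonempty
-- (returning only in the degenerate empty-text case) and B raises unconditionally.
def Pre_maximize_Number_Of_Subsequences (text : String) (pattern : String) : Prop :=
  2 ≤ pattern.toList.length
instance (text : String) (pattern : String) : Decidable (Pre_maximize_Number_Of_Subsequences text pattern) := by unfold Pre_maximize_Number_Of_Subsequences; infer_instance
def pvWitness_maximize_Number_Of_Subsequences : String × String := ("abab", "ab")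
def Spec_maximize_Number_Of_Subsequences (text : String) (pattern : String) (out : Int) : Prop := out = maximize_Number_Of_Subsequences_alt text pattern
instance (text : String) (pattern : String) (out : Int) : Decidable (Spec_maximize_Number_Of_Subsequences text pattern out) := by unfold Spec_maximize_Number_Of_Subsequences; infer_instance

-- ===== CLAIM (what is proved, stated in full; the proofs are below) =====
def Claim_equal_maximize_Number_Of_Subsequences : Prop := ∀ (text : String) (pattern : String), Dom_maximize_Number_Of_Subsequences text pattern → Pre_maximize_Number_Of_Subsequences text pattern → Spec_maximize_Number_Of_Subsequences text pattern (maximize_Number_Of_Subsequences text pattern)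

-- ===== LEMMAS AND PROOFS =====

-- number of pairs (p0 at i, p1 at j, i < j), grouped by the left end
def pvPairs (p0 p1 : Char) : List Char → Int
  | [] => 0
  | c :: t => (if c = p0 then (t.count p1 : Int) else 0) + pvPairs p0 p1 t

theorem pvPairs_append (p0 p1 : Char) (l r : List Char) :
    pvPairs p0 p1 (l ++ r)
      = pvPairs p0 p1 l + pvPairs p0 p1 r + (l.count p0 : Int) * (r.count p1 : Int) := by
  induction l with
  | nil => simp [pvPairs]
  | cons c t ih =>
    simp only [List.cons_append, pvPairs, ih, List.count_append, List.count_cons]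
    by_cases hc : c = p0 <;> simp [hc] <;> push_cast <;> ring

theorem pvSolve_eq (p0 p1 : Char) (s : List Char) :
    pvSolve p0 p1 s = (pvPairs p0 p1 s, (s.count p0 : Int), (s.count p1 : Int)) := by
  induction s using pvSolve.induct p0 p1 with
  | case1 s hs =>
    rw [pvSolve, if_pos hs]
    match s, hs with
    | [], _ => simp [pvPairs]
    | [c], _ =>
      simp only [pvPairs, List.count_cons, List.count_nil, List.cons.injEq, and_true]
      by_cases h0 : c = p0 <;> by_cases h1 : c = p1 <;> simp [h0, h1]
  | case2 s hs mid ih1 ih2 =>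
    rw [pvSolve, if_neg hs]
    rw [show s.length / 2 = mid from rfl]
    simp only [ih1, ih2]
    have hp : pvPairs p0 p1 s = pvPairs p0 p1 (s.take mid) + pvPairs p0 p1 (s.drop mid)
        + ((s.take mid).count p0 : Int) * ((s.drop mid).count p1 : Int) := by
      conv_lhs => rw [← List.take_append_drop mid s]
      exact pvPairs_append p0 p1 _ _
    have hc0 : s.count p0 = (s.take mid).count p0 + (s.drop mid).count p0 := by
      conv_lhs => rw [← List.take_append_drop mid s]
      exact List.count_append ..
    have hc1 : s.count p1 = (s.take mid).count p1 + (s.drop mid).count p1 := by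
      conv_lhs => rw [← List.take_append_drop mid s]
      exact List.count_append ..
    simp only [hp, hc0, hc1]
    push_cast; ring_nf

theorem pvStepA_eq (pattern : String) (p0 p1 : Char)
    (h0 : PySem.Str.pyGet? pattern 0 = some p0)
    (h1 : PySem.Str.pyGet? pattern 1 = some p1)
    (st : Int × Int × Int) (i : Char) :
    pvStepA pattern st i
      = (st.1 + (if i = p1 then st.2.1 else 0),
         st.2.1 + (if i = p0 then 1 else 0),
         st.2.2 + (if i = p1 then 1 else 0)) := by
  simp only [pvStepA, h0, h1, Option.some.injEq]
  rcases eq_or_ne i p1 with rfl | h1c <;> rcases eq_or_ne i p0 with rfl | h0c <;>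
    simp_all [eq_comm]

theorem pvFoldA_eq (pattern : String) (p0 p1 : Char)
    (h0 : PySem.Str.pyGet? pattern 0 = some p0)
    (h1 : PySem.Str.pyGet? pattern 1 = some p1)
    (l : List Char) :
    ∀ (ans x y : Int),
      l.foldl (pvStepA pattern) (ans, x, y)
      = (ans + pvPairs p0 p1 l + x * (l.count p1 : Int),
         x + (l.count p0 : Int), y + (l.count p1 : Int)) := by
  induction l with
  | nil => intro ans x y; simp [pvPairs]
  | cons c t ih =>
    intro ans x y
    rw [List.foldl_cons, pvStepA_eq pattern p0 p1 h0 h1, ih]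
    simp only [pvPairs, List.count_cons, Prod.mk.injEq]
    rcases eq_or_ne c p1 with rfl | h1c
    · rcases eq_or_ne c p0 with rfl | h0c
      · simp; and_intros <;> (first | trivial | (push_cast; ring))
      · simp [h0c]; and_intros <;> (first | trivial | (push_cast; ring))
    · rcases eq_or_ne c p0 with rfl | h0c
      · simp [h1c]; and_intros <;> (first | trivial | (push_cast; ring))
      · simp [h0c, h1c]

-- ===== VERDICT (by name: the statement is the Claim_ definition above) =====
theorem maximize_Number_Of_Subsequences_spec : Claim_equal_maximize_Number_Of_Subsequences := by
  intro text pattern _ hpre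
  unfold Spec_maximize_Number_Of_Subsequences
  have hlen : 2 ≤ pattern.toList.length := hpre
  obtain ⟨p0, h0⟩ : ∃ p0, PySem.Str.pyGet? pattern 0 = some p0 := by
    have := PySem.List.pyGet?_ofNat (xs := pattern.toList) (n := 0) (by omega)
    exact ⟨_, by simpa [PySem.Str.pyGet?] using this⟩
  obtain ⟨p1, h1⟩ : ∃ p1, PySem.Str.pyGet? pattern 1 = some p1 := by
    have := PySem.List.pyGet?_ofNat (xs := pattern.toList) (n := 1) (by omega)
    exact ⟨_, by simpa [PySem.Str.pyGet?] using this⟩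
  unfold maximize_Number_Of_Subsequences maximize_Number_Of_Subsequences_alt
  rw [h0, h1]
  simp only [pvFoldA_eq pattern p0 p1 h0 h1 text.toList 0 0 0, pvSolve_eq]
  simp
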